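-- pv_equiv track=rewrite | github.com/khesly1903/Vigenere-Cipher | vigenere.py | vigeneredeKey
-- ===== SOURCE A (Python) =====
-- def vigeneredeKey(text: str, key: str) -> str:
--     vigenereKey = ""
--     vCount = 0
--
--     for i in range(len(text)):
--         if text[i].isalpha():
--             vCount += 1
--
--     if len(key) <= vCount:
--         for i in range(vCount):
--             vigenereKey += key[i % len(key)]
--
--         for i in range(len(text)):
--             if not text[i].isalpha():
--                 vigenereKey = vigenereKey[:i] + text[i] + vigenereKey[i:]
--     else:
--         key_index = 0
--         for i in range(len(text)):
--             if text[i].isalpha():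
--                 vigenereKey += key[key_index % len(key)]
--                 key_index += 1
--             else:
--                 vigenereKey += text[i]
--
--     return vigenereKey
-- ===== SOURCE B (Python) =====
-- def vigeneredeKey(text: str, key: str) -> str:
--     # Two-phase: build the keystream for the alphabetic positions, then merge it with text.
--     vCount = sum(1 for c in text if c.isalpha())
--     stream = "".join(key[i % len(key)] for i in range(vCount))
--     out = []
--     idx = 0
--     for c in text:
--         if c.isalpha():
--             out.append(stream[idx])
--             idx += 1
--         else:
--             out.append(c)
--     return "".join(out)
-- ===== Notes on version B (the rewrite author's own statement) =====
-- stated objective: simpler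
-- what changed: B replaces A's branch on key length (keystream build plus in-place string insertions vs a separate interleaved pass) with one unconditional two-phase structure: count alphabetic chars, precompute the aligned keystream, then a single merge pass over the text.
import Mathlib
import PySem

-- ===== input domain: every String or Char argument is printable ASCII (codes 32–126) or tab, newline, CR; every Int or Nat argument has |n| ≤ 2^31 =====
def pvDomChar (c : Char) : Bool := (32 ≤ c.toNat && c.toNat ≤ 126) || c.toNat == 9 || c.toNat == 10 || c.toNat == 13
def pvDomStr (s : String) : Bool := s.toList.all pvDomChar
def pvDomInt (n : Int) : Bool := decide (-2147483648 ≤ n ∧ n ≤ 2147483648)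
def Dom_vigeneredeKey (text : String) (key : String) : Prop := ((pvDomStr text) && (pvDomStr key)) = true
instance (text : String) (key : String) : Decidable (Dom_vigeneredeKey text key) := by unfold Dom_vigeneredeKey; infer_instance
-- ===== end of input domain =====

-- B rebuilds the result as keystream-precompute + merge pass instead of A's branch on key length with
-- string insertions; same return value on Pre_ (a simpler two-phase decomposition, not claimed faster).

-- ===== PORT A =====
-- Literal port of A through List Char (Python str ops are defined on lists in PySem).
-- key[i % len(key)] raises ZeroDivisionError in Python when key == "": those inputs are outside
-- Pre_vigeneredeKey; the port uses total pyGetD/Int.mod there.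
def vigeneredeKey (text : String) (key : String) : String :=
  let t := text.toList
  let k := key.toList
  -- vCount = number of alphabetic chars, counted by index loop
  let vCount : Int :=
    (PySem.List.pyRange 0 (t.length : Int)).foldl
      (fun c i => if PySem.Chars.isalpha (PySem.List.pyGetD t i ' ') then c + 1 else c) 0
  if (k.length : Int) ≤ vCount then
    -- build keystream of length vCount, then insert each non-alpha text char at its index
    let vk1 : List Char :=
      (PySem.List.pyRange 0 vCount).foldl
        (fun acc i => acc ++ [PySem.List.pyGetD k (PySem.Int.mod i (k.length : Int)) ' ']) []
    let vk2 : List Char :=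
      (PySem.List.pyRange 0 (t.length : Int)).foldl
        (fun vk i =>
          if ¬ PySem.Chars.isalpha (PySem.List.pyGetD t i ' ') then
            PySem.List.slice vk none (some i) ++ PySem.List.pyGetD t i ' ' :: PySem.List.slice vk (some i) none
          else vk) vk1
    String.ofList vk2
  else
    -- interleaved pass with running key_index
    let r :=
      (PySem.List.pyRange 0 (t.length : Int)).foldl
        (fun (st : List Char × Int) i =>
          if PySem.Chars.isalpha (PySem.List.pyGetD t i ' ') then
            (st.1 ++ [PySem.List.pyGetD k (PySem.Int.mod st.2 (k.length : Int)) ' '], st.2 + 1)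
          else
            (st.1 ++ [PySem.List.pyGetD t i ' '], st.2)) ([], 0)
    String.ofList r.1

-- ===== PORT B =====
-- Literal port of Source B: count alphabetic chars, precompute the aligned keystream, then one merge pass.
def vigeneredeKey_alt (text : String) (key : String) : String :=
  let t := text.toList
  let k := key.toList
  let vCount : Nat := t.countP (fun c => PySem.Chars.isalpha c)
  let stream : List Char := (List.range vCount).map (fun i => k.getD (i % k.length) ' ')
  let r :=
    t.foldl
      (fun (st : List Char × Nat) c =>
        if PySem.Chars.isalpha c then (st.1 ++ [stream.getD st.2 ' '], st.2 + 1)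
        else (st.1 ++ [c], st.2)) ([], 0)
  String.ofList r.1

-- ===== PRECONDITION & SPEC =====
-- Pre_ excludes exactly the inputs where Python A raises ZeroDivisionError (key == "" while text
-- contains an alphabetic char); B raises there too.
def Pre_vigeneredeKey (text : String) (key : String) : Prop :=
  key.toList ≠ [] ∨ ∀ c ∈ text.toList, PySem.Chars.isalpha c = false
instance (text : String) (key : String) : Decidable (Pre_vigeneredeKey text key) := by
  unfold Pre_vigeneredeKey; infer_instance

def pvWitness_vigeneredeKey : String × String := ("ab c!", "k")

def Spec_vigeneredeKey (text : String) (key : String) (out : String) : Prop := out = vigeneredeKey_alt text key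
instance (text : String) (key : String) (out : String) : Decidable (Spec_vigeneredeKey text key out) := by unfold Spec_vigeneredeKey; infer_instance

-- ===== CLAIM (what is proved, stated in full; the proofs are below) =====
def Claim_equal_vigeneredeKey : Prop := ∀ (text : String) (key : String), Dom_vigeneredeKey text key → Pre_vigeneredeKey text key → Spec_vigeneredeKey text key (vigeneredeKey text key)

-- ===== LEMMAS AND PROOFS =====

-- canonical per-character description of the aligned keystream (j = alphabetic chars seen so far)
def pvCanon (k : List Char) : List Char → Nat → List Char
  | [], _ => []
  | c :: cs, j =>
    if PySem.Chars.isalpha c then k.getD (j % k.length) ' ' :: pvCanon k cs (j + 1)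
    else c :: pvCanon k cs j

theorem pvCanon_length (k : List Char) : ∀ (t : List Char) (j : Nat), (pvCanon k t j).length = t.length := by
  intro t
  induction t with
  | nil => intro j; rfl
  | cons c cs ih => intro j; simp only [pvCanon]; split <;> simp [ih]

theorem pvCanon_append (k : List Char) :
    ∀ (xs : List Char) (c : Char) (j : Nat),
      pvCanon k (xs ++ [c]) j =
        pvCanon k xs j ++
          [if PySem.Chars.isalpha c then
             k.getD ((j + xs.countP (fun x => PySem.Chars.isalpha x)) % k.length) ' '
           else c] := by
  intro xs
  induction xs with
  | nil => intro c j; by_cases h : PySem.Chars.isalpha c <;> simp [pvCanon, h]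
  | cons x xs ih =>
    intro c j
    simp only [List.cons_append, pvCanon, List.countP_cons]
    by_cases h : PySem.Chars.isalpha x
    · simp only [h, if_true, ih]
      have : j + 1 + xs.countP (fun x => PySem.Chars.isalpha x)
           = j + (xs.countP (fun x => PySem.Chars.isalpha x) + 1) := by omega
      simp [this]
    · simp [h, ih]

-- the keystream element below its length
theorem pvStream_getD (k : List Char) (vC j : Nat) (hj : j < vC) :
    ((List.range vC).map (fun i => k.getD (i % k.length) ' ')).getD j ' ' = k.getD (j % k.length) ' ' := by
  rw [List.getD_eq_getElem?_getD]
  simp [List.getElem?_map, List.getElem?_range hj]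

-- B's merge pass produces pvCanon
theorem pvMerge_eq (k : List Char) (vC : Nat) :
    ∀ (xs : List Char) (acc : List Char) (j : Nat),
      j + xs.countP (fun c => PySem.Chars.isalpha c) ≤ vC →
      (xs.foldl
        (fun (st : List Char × Nat) c =>
          if PySem.Chars.isalpha c then
            (st.1 ++ [((List.range vC).map (fun i => k.getD (i % k.length) ' ')).getD st.2 ' '], st.2 + 1)
          else (st.1 ++ [c], st.2)) (acc, j)).1 = acc ++ pvCanon k xs j := by
  intro xs
  induction xs with
  | nil => intro acc j _; simp [pvCanon]
  | cons c cs ih =>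
    intro acc j hb
    simp only [List.foldl_cons, pvCanon]
    by_cases h : PySem.Chars.isalpha c
    · have hj : j < vC := by simp [h] at hb; omega
      simp only [h, if_true]
      rw [ih _ _ (by simp [h] at hb; omega)]
      rw [pvStream_getD k vC j hj]
      simp
    · simp only [h, if_false, Bool.false_eq_true]
      rw [ih _ _ (by simp [h] at hb ⊢; omega)]
      simp

-- A's else-branch interleaved pass (Int key_index, Python indexing) produces pvCanon
theorem pvInterleave_eq (k : List Char) :
    ∀ (xs : List Char) (acc : List Char) (j : Nat),
      (xs.foldl
        (fun (st : List Char × Int) c =>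
          if PySem.Chars.isalpha c then
            (st.1 ++ [PySem.List.pyGetD k (PySem.Int.mod st.2 (k.length : Int)) ' '], st.2 + 1)
          else (st.1 ++ [c], st.2)) (acc, (j : Int))).1 = acc ++ pvCanon k xs j := by
  intro xs
  induction xs with
  | nil => intro acc j; simp [pvCanon]
  | cons c cs ih =>
    intro acc j
    simp only [List.foldl_cons, pvCanon]
    by_cases h : PySem.Chars.isalpha c
    · simp only [h, if_true, PySem.Int.mod_natCast, PySem.List.pyGetD_natCast]
      have hcast : ((j : Int) + 1) = ((j + 1 : Nat) : Int) := by push_cast; ring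
      rw [hcast, ih]
      simp
    · simp only [h, if_false, Bool.false_eq_true]
      rw [ih]
      simp

-- A's first-branch insertion loop, processed up to index n, equals pvCanon on the prefix
-- followed by the not-yet-consumed tail of the keystream.
theorem pvInsert_eq (k t : List Char) :
    ∀ (n : Nat), n ≤ t.length →
      ((List.range n).foldl
        (fun vk i =>
          if ¬ PySem.Chars.isalpha (t.getD i ' ') then
            vk.take i ++ t.getD i ' ' :: vk.drop i
          else vk)
        ((List.range (t.countP (fun c => PySem.Chars.isalpha c))).map
          (fun i => k.getD (i % k.length) ' '))) =
      pvCanon k (t.take n) 0 ++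
        ((List.range (t.countP (fun c => PySem.Chars.isalpha c))).map
          (fun i => k.getD (i % k.length) ' ')).drop ((t.take n).countP (fun c => PySem.Chars.isalpha c)) := by
  intro n
  induction n with
  | zero => intro _; simp [pvCanon]
  | succ n ih =>
    intro hn
    have hlt : n < t.length := by omega
    rw [List.range_succ, List.foldl_append, List.foldl_cons, List.foldl_nil, ih (by omega)]
    have hget : t.getD n ' ' = t[n] := by
      rw [List.getD_eq_getElem?_getD, List.getElem?_eq_getElem hlt]; rfl
    have htake : t.take (n + 1) = t.take n ++ [t[n]] := by
      rw [List.take_add_one, List.getElem?_eq_getElem hlt]; rfl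
    have hclen : (pvCanon k (t.take n) 0).length = n := by
      rw [pvCanon_length, List.length_take]; omega
    have hcnt1 : (t.take n ++ [t[n]]).countP (fun c => PySem.Chars.isalpha c)
        = (t.take n).countP (fun c => PySem.Chars.isalpha c)
          + (if PySem.Chars.isalpha t[n] then 1 else 0) := by
      rw [List.countP_append]; simp [List.countP_cons]
    rw [htake, pvCanon_append, hcnt1]
    by_cases h : PySem.Chars.isalpha t[n]
    · -- alphabetic: the insertion loop leaves vk unchanged; peel one keystream element
      have hcn : (t.take n).countP (fun c => PySem.Chars.isalpha c)
          < t.countP (fun c => PySem.Chars.isalpha c) := by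
        conv_rhs => rw [← List.take_append_drop n t]
        rw [List.countP_append, List.drop_eq_getElem_cons hlt, List.countP_cons]
        simp [h]
      set vC := t.countP (fun c => PySem.Chars.isalpha c) with hvC
      set cn := (t.take n).countP (fun c => PySem.Chars.isalpha c) with hcnd
      have hlen : ((List.range vC).map (fun i => k.getD (i % k.length) ' ')).length = vC := by simp
      have hdrop : ((List.range vC).map (fun i => k.getD (i % k.length) ' ')).drop cn
          = k.getD (cn % k.length) ' ' ::
            ((List.range vC).map (fun i => k.getD (i % k.length) ' ')).drop (cn + 1) := by
        rw [List.drop_eq_getElem_cons (by rw [hlen]; exact hcn)]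
        congr 1
        simp [List.getElem_map, List.getElem_range]
      rw [hget, if_neg (by simp [h]), hdrop]
      simp [h, List.append_assoc]
    · -- non-alphabetic: insertion at index n = append after the canon prefix
      rw [hget, if_pos (by simp [h]), List.take_left' hclen, List.drop_left' hclen]
      simp [h, List.append_assoc]

-- normalize A's Int-range index loops to Nat-range folds
theorem pvA_vcount (t : List Char) :
    (PySem.List.pyRange 0 (t.length : Int)).foldl
      (fun c i => if PySem.Chars.isalpha (PySem.List.pyGetD t i ' ') then c + 1 else c) (0 : Int)
    = (t.countP (fun c => PySem.Chars.isalpha c) : Int) := by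
  rw [PySem.List.foldl_pyRange_zero_pyGetD' t ' '
    (fun (c : Int) x => if PySem.Chars.isalpha x then c + 1 else c) 0]
  rw [PySem.List.foldl_count_if]
  simp

-- ===== VERDICT (by name: the statement is the Claim_ definition above) =====
theorem vigeneredeKey_spec : Claim_equal_vigeneredeKey := by
  intro text key _ _
  unfold Spec_vigeneredeKey vigeneredeKey vigeneredeKey_alt
  simp only []
  rw [pvA_vcount text.toList]
  -- B's side
  rw [pvMerge_eq key.toList (text.toList.countP (fun c => PySem.Chars.isalpha c)) text.toList [] 0
    (by simp)]
  split
  · -- A branch 1: keystream build + insertions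
    rw [PySem.List.pyRange_zero_nat, List.foldl_map]
    simp only [PySem.Int.mod_natCast, PySem.List.pyGetD_natCast]
    rw [PySem.List.foldl_append_singleton_eq_map (fun i => key.toList.getD (i % key.toList.length) ' ')
      (List.range (text.toList.countP (fun c => PySem.Chars.isalpha c))) []]
    rw [PySem.List.pyRange_zero_nat, List.foldl_map]
    have hbody : (fun (vk : List Char) (i : Nat) =>
        if ¬ PySem.Chars.isalpha (PySem.List.pyGetD text.toList (i : Int) ' ') = true then
          PySem.List.slice vk none (some (i : Int)) ++
            PySem.List.pyGetD text.toList (i : Int) ' ' :: PySem.List.slice vk (some (i : Int)) none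
        else vk)
        = (fun (vk : List Char) (i : Nat) =>
          if ¬ PySem.Chars.isalpha (text.toList.getD i ' ') = true then
            vk.take i ++ text.toList.getD i ' ' :: vk.drop i
          else vk) := by
      funext vk i
      rw [PySem.List.pyGetD_natCast, PySem.List.slice_to vk (by positivity),
        PySem.List.slice_from vk (by positivity)]
      simp
    rw [List.nil_append, hbody, pvInsert_eq key.toList text.toList text.toList.length le_rfl,
      List.take_length]
    have hD : List.drop (List.countP (fun c => PySem.Chars.isalpha c) text.toList)
        (List.map (fun i => key.toList.getD (i % key.toList.length) ' ')
          (List.range (List.countP (fun c => PySem.Chars.isalpha c) text.toList))) = [] := by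
      apply List.drop_of_length_le; simp
    rw [hD, List.append_nil, List.nil_append]
  · -- A branch 2: interleaved pass
    have h0 : (0 : Int) = ((0 : Nat) : Int) := rfl
    rw [PySem.List.foldl_pyRange_zero_pyGetD' text.toList ' '
      (fun (st : List Char × Int) c =>
        if PySem.Chars.isalpha c then
          (st.1 ++ [PySem.List.pyGetD key.toList (PySem.Int.mod st.2 (key.toList.length : Int)) ' '], st.2 + 1)
        else (st.1 ++ [c], st.2)) ([], 0)]
    rw [h0, pvInterleave_eq key.toList text.toList [] 0, List.nil_append]
    try rw [List.nil_append]
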